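-- pv_equiv track=rewrite | github.com/maryfm4/cryptography | Shuffle_script.py | create_matrix3
-- ===== SOURCE A (Python) =====
-- def create_matrix3(text, size):
--     matrix4 = []
--     for i in range(size):
--         row = ['X' for _ in range(size)]
--         matrix4.append(row)
--
--     index = 0
--     for rows in range(size):
--         for cols in range(size):
--             if index < len(text):
--                 matrix4[rows][cols] = text[index]
--             index += 1
--     return matrix4
-- ===== SOURCE B (Python) =====
-- def create_matrix3(text, size):
--     if size <= 0:
--         return []
--     n = size * size
--     flat = list(text)[:n]
--     flat += ['X'] * (n - len(flat))
--     return [flat[r * size:(r + 1) * size] for r in range(size)]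
-- ===== Notes on version B (the rewrite author's own statement) =====
-- stated objective: simpler
-- what changed: Builds a flat padded character list once and reshapes it into rows by slicing, instead of pre-filling an X-matrix and overwriting cells via a nested index loop.
import Mathlib
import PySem

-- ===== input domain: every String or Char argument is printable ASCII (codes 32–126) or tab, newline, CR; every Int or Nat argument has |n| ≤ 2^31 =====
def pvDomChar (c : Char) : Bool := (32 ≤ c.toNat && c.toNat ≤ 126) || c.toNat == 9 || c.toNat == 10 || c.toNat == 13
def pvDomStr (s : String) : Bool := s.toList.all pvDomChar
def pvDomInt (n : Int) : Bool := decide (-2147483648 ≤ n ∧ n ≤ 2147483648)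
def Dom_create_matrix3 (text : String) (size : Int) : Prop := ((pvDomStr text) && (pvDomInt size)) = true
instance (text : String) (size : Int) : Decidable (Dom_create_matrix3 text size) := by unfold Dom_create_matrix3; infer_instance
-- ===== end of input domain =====

-- B reshapes a flat padded character list into rows by slicing instead of A's
-- pre-filled X-matrix overwritten cell by cell in a nested loop (objective: simpler).

-- ===== PORT A =====
-- literal transliteration of A: build an X-matrix, then overwrite cells with a running index.
-- rows/cols come from range(size) so they are ≥ 0 and .toNat is exact; the guarded
-- text[index] access (always in range when the guard holds) is pyGetD.
def create_matrix3 (text : String) (size : Int) : List (List String) :=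
  let matrix4 : List (List String) :=
    (PySem.List.pyRange 0 size 1).foldl
      (fun m _ => m ++ [(PySem.List.pyRange 0 size 1).map (fun _ => "X")]) []
  let cs : List String := text.toList.map toString
  let st :=
    (PySem.List.pyRange 0 size 1).foldl
      (fun (st : List (List String) × Int) rows =>
        (PySem.List.pyRange 0 size 1).foldl
          (fun (st : List (List String) × Int) cols =>
            if st.2 < (cs.length : Int) then
              (st.1.modify rows.toNat (fun row => row.set cols.toNat (PySem.List.pyGetD cs st.2 "")),
               st.2 + 1)
            else (st.1, st.2 + 1))
          st)
      (matrix4, 0)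
  st.1

-- ===== PORT B =====
-- literal transliteration of B: flat = list(text)[:n]; flat += ['X']*(n-len(flat));
-- rows by slicing flat.
def create_matrix3_alt (text : String) (size : Int) : List (List String) :=
  if size ≤ 0 then [] else
  let n := size * size
  let flat0 := PySem.List.slice (text.toList.map toString) none (some n)
  let flat := flat0 ++ PySem.List.pyRepeat ["X"] (n - (flat0.length : Int))
  (PySem.List.pyRange 0 size 1).map
    (fun r => PySem.List.slice flat (some (r * size)) (some ((r + 1) * size)))

-- ===== PRECONDITION & SPEC =====
def Spec_create_matrix3 (text : String) (size : Int) (out : List (List String)) : Prop := out = create_matrix3_alt text size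
instance (text : String) (size : Int) (out : List (List String)) : Decidable (Spec_create_matrix3 text size out) := by unfold Spec_create_matrix3; infer_instance

-- ===== CLAIM (what is proved, stated in full; the proofs are below) =====
def Claim_equal_create_matrix3 : Prop := ∀ (text : String) (size : Int), Dom_create_matrix3 text size → Spec_create_matrix3 text size (create_matrix3 text size)

-- ===== LEMMAS AND PROOFS =====

-- appending one row per loop iteration builds a replicate
theorem foldl_append_row {α β : Type} (l : List β) (init : List α) (row : α) :
    l.foldl (fun m _ => m ++ [row]) init = init ++ List.replicate l.length row := by
  induction l generalizing init with
  | nil => simp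
  | cons x xs ih =>
    rw [List.foldl_cons, ih, List.append_assoc, List.length_cons, List.singleton_append,
      ← List.replicate_succ]

theorem modify_modify {α : Type} (m : List α) (i : Nat) (f g : α → α) :
    (m.modify i f).modify i g = m.modify i (fun x => g (f x)) := by
  apply List.ext_getElem
  · simp
  · intro j h1 h2
    simp [List.getElem_modify]
    split <;> simp_all

-- the effect of A's inner loop on one row, described as a fold over range k
def fillUpto (cs : List String) (idx : Int) (row : List String) (k : Nat) : List String :=
  (List.range k).foldl
    (fun row (c : Nat) =>
      if idx + (c : Int) < (cs.length : Int) then row.set c (PySem.List.pyGetD cs (idx + (c : Int)) "") else row)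
    row

theorem fillUpto_succ (cs : List String) (idx : Int) (row : List String) (k : Nat) :
    fillUpto cs idx row (k + 1) =
      if idx + (k : Int) < (cs.length : Int) then
        (fillUpto cs idx row k).set k (PySem.List.pyGetD cs (idx + (k : Int)) "")
      else fillUpto cs idx row k := by
  simp only [fillUpto, List.range_succ, List.foldl_append, List.foldl_cons, List.foldl_nil]

theorem length_fillUpto (cs : List String) (idx : Int) (row : List String) (k : Nat) :
    (fillUpto cs idx row k).length = row.length := by
  induction k with
  | zero => simp [fillUpto]
  | succ k ih =>
    rw [fillUpto_succ]
    split
    · simp [ih]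
    · exact ih

theorem getElem_fillUpto (cs : List String) (idx : Int) (row : List String) (k : Nat)
    (c : Nat) (h : c < (fillUpto cs idx row k).length) (h' : c < row.length) :
    (fillUpto cs idx row k)[c] =
      if c < k ∧ idx + c < (cs.length : Int) then PySem.List.pyGetD cs (idx + c) "" else row[c] := by
  induction k with
  | zero => simp [fillUpto]
  | succ k ih =>
    by_cases hk : idx + (k : Int) < (cs.length : Int)
    · have hstep := fillUpto_succ cs idx row k
      rw [if_pos hk] at hstep
      simp only [hstep]
      rw [List.getElem_set]
      by_cases hc : k = c
      · subst hc; simp [hk]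
      · rw [if_neg hc, ih (by simp [length_fillUpto, h'])]
        have : (c < k ∧ idx + (c : Int) < (cs.length : Int)) ↔
            (c < k + 1 ∧ idx + (c : Int) < (cs.length : Int)) := by
          constructor <;> rintro ⟨a, b⟩ <;> exact ⟨by omega, b⟩
        simp only [this]
    · have hstep := fillUpto_succ cs idx row k
      rw [if_neg hk] at hstep
      simp only [hstep]
      rw [ih (by simp [length_fillUpto, h'])]
      by_cases hc : c < k
      · have : (c < k ∧ idx + (c : Int) < (cs.length : Int)) ↔
            (c < k + 1 ∧ idx + (c : Int) < (cs.length : Int)) := by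
          constructor <;> rintro ⟨a, b⟩ <;> exact ⟨by omega, b⟩
        simp only [this]
      · have h1 : ¬ (c < k ∧ idx + (c : Int) < (cs.length : Int)) := fun ⟨a, _⟩ => hc a
        have h2 : ¬ (c < k + 1 ∧ idx + (c : Int) < (cs.length : Int)) := by
          rintro ⟨a, b⟩
          have : c = k := by omega
          subst this; exact hk b
        rw [if_neg h1, if_neg h2]

-- A's inner loop: fills row r from the running index, index advances by k
theorem inner_spec (cs : List String) (k : Nat) (r : Int) (m : List (List String)) (idx : Int) :
    (PySem.List.pyRange 0 (k : Int) 1).foldl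
      (fun (st : List (List String) × Int) cols =>
        if st.2 < (cs.length : Int) then
          (st.1.modify r.toNat (fun row => row.set cols.toNat (PySem.List.pyGetD cs st.2 "")),
           st.2 + 1)
        else (st.1, st.2 + 1))
      (m, idx)
    = (m.modify r.toNat (fun row => fillUpto cs idx row k), idx + k) := by
  induction k with
  | zero =>
    simp only [Nat.cast_zero, PySem.List.pyRange_one_eq_nil (le_refl 0), List.foldl_nil]
    refine Prod.ext ?_ ?_
    · have h0 : (fun row : List String => fillUpto cs idx row 0) = fun row => row :=
        funext fun row => by simp [fillUpto]
      rw [h0]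
      exact (List.modify_id r.toNat m).symm
    · simp
  | succ k ih =>
    have hcast : ((k : Int) + 1) = ((k + 1 : Nat) : Int) := by push_cast; ring
    rw [← hcast, PySem.List.pyRange_one_succ_right (by positivity), List.foldl_append,
      ih, List.foldl_cons, List.foldl_nil]
    by_cases hk : idx + (k : Int) < (cs.length : Int)
    · have hfun : (fun row => fillUpto cs idx row (k + 1))
          = fun row => (fillUpto cs idx row k).set k (PySem.List.pyGetD cs (idx + (k : Int)) "") :=
        funext fun row => by rw [fillUpto_succ, if_pos hk]
      simp only [if_pos hk, Int.toNat_natCast, modify_modify, hfun]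
      refine Prod.ext rfl ?_
      push_cast; ring
    · have hfun : (fun row => fillUpto cs idx row (k + 1)) = fun row => fillUpto cs idx row k :=
        funext fun row => by rw [fillUpto_succ, if_neg hk]
      simp only [if_neg hk, hfun]
      refine Prod.ext rfl ?_
      push_cast; ring

-- the matrix after the first j outer iterations
def matAfter (cs : List String) (N j : Nat) : List (List String) :=
  (List.range N).map
    (fun r => if r < j then fillUpto cs ((r : Int) * (N : Int)) (List.replicate N "X") N
              else List.replicate N "X")

theorem outer_spec (cs : List String) (N : Nat) (j : Nat) (hj : j ≤ N) :
    (PySem.List.pyRange 0 (j : Int) 1).foldl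
      (fun (st : List (List String) × Int) rows =>
        (PySem.List.pyRange 0 (N : Int) 1).foldl
          (fun (st : List (List String) × Int) cols =>
            if st.2 < (cs.length : Int) then
              (st.1.modify rows.toNat (fun row => row.set cols.toNat (PySem.List.pyGetD cs st.2 "")),
               st.2 + 1)
            else (st.1, st.2 + 1))
          st)
      (List.replicate N (List.replicate N "X"), 0)
    = (matAfter cs N j, (j : Int) * (N : Int)) := by
  induction j with
  | zero =>
    simp [PySem.List.pyRange_one_eq_nil, matAfter]
  | succ j ih =>
    have hj' : j ≤ N := by omega
    have hcast : ((j : Int) + 1) = ((j + 1 : Nat) : Int) := by push_cast; ring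
    rw [← hcast, PySem.List.pyRange_one_succ_right (by positivity), List.foldl_append,
      ih hj', List.foldl_cons, List.foldl_nil, inner_spec]
    refine Prod.ext ?_ ?_
    · apply List.ext_getElem
      · simp [matAfter]
      · intro r h1 h2
        simp only [matAfter, List.getElem_modify, List.getElem_map, List.getElem_range] at *
        have hrN : r < N := by simpa [matAfter] using h2
        by_cases hrj : (j : Int).toNat = r
        · have : r = j := by omega
          subst this
          simp [hrj]
        · have hne : r ≠ j := by omega
          rw [if_neg hrj]
          have : (r < j) ↔ (r < j + 1) := by omega
          simp [this]
    · push_cast; ring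

-- entries of B's flat padded list
theorem getElem_flat (cs : List String) (NN : Nat) (j : Nat) (hj : j < NN)
    (h : j < (cs.take NN ++ List.replicate (NN - (cs.take NN).length) "X").length) :
    (cs.take NN ++ List.replicate (NN - (cs.take NN).length) "X")[j] =
      if hL : j < cs.length then cs[j] else "X" := by
  rw [List.getElem_append]
  by_cases hL : j < (cs.take NN).length
  · have hjL : j < cs.length := by rw [List.length_take] at hL; omega
    simp only [dif_pos hL, List.getElem_take, dif_pos hjL]
  · have hjL : ¬ j < cs.length := by rw [List.length_take] at hL; omega
    simp only [dif_neg hL, dif_neg hjL, List.getElem_replicate]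

-- ===== VERDICT (by name: the statement is the Claim_ definition above) =====
theorem create_matrix3_spec : Claim_equal_create_matrix3 := by
  intro text size _
  show create_matrix3 text size = create_matrix3_alt text size
  -- zeta-reduced forms of the two ports (definitional)
  have hA : create_matrix3 text size =
      ((PySem.List.pyRange 0 size 1).foldl
        (fun (st : List (List String) × Int) rows =>
          (PySem.List.pyRange 0 size 1).foldl
            (fun (st : List (List String) × Int) cols =>
              if st.2 < (((text.toList.map toString) : List String).length : Int) then
                (st.1.modify rows.toNat (fun row => row.set cols.toNat
                   (PySem.List.pyGetD (text.toList.map toString) st.2 "")), st.2 + 1)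
              else (st.1, st.2 + 1)) st)
        ((PySem.List.pyRange 0 size 1).foldl
          (fun m _ => m ++ [(PySem.List.pyRange 0 size 1).map (fun _ => "X")]) [], 0)).1 := rfl
  rw [hA]
  set cs : List String := text.toList.map toString with hcs
  by_cases hpos : 0 < size
  · -- size > 0
    have hB : create_matrix3_alt text size =
        (PySem.List.pyRange 0 size 1).map
          (fun r => PySem.List.slice
            (PySem.List.slice cs none (some (size * size)) ++
              PySem.List.pyRepeat ["X"] (size * size -
                ((PySem.List.slice cs none (some (size * size))).length : Int)))
            (some (r * size)) (some ((r + 1) * size))) := by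
      simp only [create_matrix3_alt, if_neg (show ¬ size ≤ 0 by omega)]
      rw [hcs]
    rw [hB]
    set N : Nat := size.toNat with hN
    have hsz : (N : Int) = size := Int.toNat_of_nonneg (le_of_lt hpos)
    have hlen : (PySem.List.pyRange 0 size 1).length = N := by
      simp [PySem.List.length_pyRange_one, hN]
    have hrow : (PySem.List.pyRange 0 size 1).map (fun _ => "X") = List.replicate N "X" := by
      rw [List.map_const', hlen]
    have hinit : (PySem.List.pyRange 0 size 1).foldl
        (fun m _ => m ++ [(PySem.List.pyRange 0 size 1).map (fun _ => "X")]) ([] : List (List String))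
        = List.replicate N (List.replicate N "X") := by
      rw [foldl_append_row, hrow, hlen, List.nil_append]
    rw [hinit, ← hsz, outer_spec cs N N (le_refl N)]
    -- fold B's flat list into take-plus-replicate form
    have eNN : ((N : Int) * (N : Int)).toNat = N * N := by
      rw [← Nat.cast_mul, Int.toNat_natCast]
    have hflat0 : PySem.List.slice cs none (some ((N : Int) * (N : Int))) = cs.take (N * N) := by
      rw [PySem.List.slice_to cs (by positivity), eNN]
    have hflat : PySem.List.slice cs none (some ((N : Int) * (N : Int))) ++
        PySem.List.pyRepeat ["X"] ((N : Int) * (N : Int) -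
          ((PySem.List.slice cs none (some ((N : Int) * (N : Int)))).length : Int))
        = cs.take (N * N) ++ List.replicate (N * N - (cs.take (N * N)).length) "X" := by
      rw [hflat0, PySem.List.pyRepeat_singleton]
      congr 1
      have h1 : (cs.take (N * N)).length ≤ N * N := by simp
      rw [← Nat.cast_mul]
      congr 1
      omega
    rw [hflat]
    set flat := cs.take (N * N) ++ List.replicate (N * N - (cs.take (N * N)).length) "X" with hfl
    have hflatlen : flat.length = N * N := by
      have h1 : (cs.take (N * N)).length ≤ N * N := by simp
      simp only [hfl, List.length_append, List.length_replicate]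
      omega
    show matAfter cs N N = _
    apply List.ext_getElem
    · simp [matAfter, PySem.List.length_pyRange_one]
    · intro r h1 h2
      have hrN : r < N := by simpa [matAfter] using h1
      simp only [matAfter, List.getElem_map, List.getElem_range, if_pos hrN,
        PySem.List.getElem_pyRange_one, zero_add]
      have erN : ((r : Int) * (N : Int)).toNat = r * N := by
        rw [← Nat.cast_mul, Int.toNat_natCast]
      have esN : (((r : Int) + 1) * (N : Int)).toNat = (r + 1) * N := by
        rw [show ((r : Int) + 1) = (((r + 1 : Nat)) : Int) by push_cast; ring,
          ← Nat.cast_mul, Int.toNat_natCast]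
      have hmul : (r + 1) * N = r * N + N := by ring
      have hslice : PySem.List.slice flat (some ((r : Int) * (N : Int)))
            (some (((r : Int) + 1) * (N : Int)))
          = (flat.drop (r * N)).take N := by
        rw [PySem.List.slice_toNat flat (by positivity) (by positivity), erN, esN]
        congr 1
        omega
      rw [hslice]
      apply List.ext_getElem
      · rw [length_fillUpto]
        simp only [List.length_take, List.length_drop, List.length_replicate, hflatlen]
        have : r * N + N ≤ N * N := by nlinarith
        omega
      · intro c hc1 hc2
        have hcN : c < N := by
          rw [length_fillUpto] at hc1; simpa using hc1
        rw [getElem_fillUpto cs _ _ _ _ _ (by simpa using hcN)]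
        have hjNN : r * N + c < N * N := by nlinarith
        rw [List.getElem_take, List.getElem_drop]
        simp only [hfl]
        rw [getElem_flat cs (N * N) (r * N + c) hjNN (by simp; omega)]
        have ecast : ((r : Int) * (N : Int) + (c : Int)).toNat = r * N + c := by
          rw [← Nat.cast_mul, ← Nat.cast_add, Int.toNat_natCast]
        by_cases hlt : r * N + c < cs.length
        · have hlt' : (r : Int) * (N : Int) + (c : Int) < (cs.length : Int) := by
            rw [← Nat.cast_mul]; push_cast; omega
          rw [if_pos ⟨hcN, hlt'⟩, dif_pos hlt,
            PySem.List.pyGetD_eq_getElem cs "" (by positivity) (by rw [← Nat.cast_mul]; push_cast; omega)]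
          simp only [ecast]
        · have hlt' : ¬ ((r : Int) * (N : Int) + (c : Int) < (cs.length : Int)) := by
            rw [← Nat.cast_mul]; push_cast; omega
          rw [if_neg (fun h => hlt' h.2), dif_neg hlt]
          simp
  · -- size ≤ 0: A's loops are empty, B returns [] directly
    rw [PySem.List.pyRange_one_eq_nil (show size ≤ 0 by omega)]
    simp [create_matrix3_alt, if_pos (show size ≤ 0 by omega)]
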